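-- pv_equiv track=rewrite | github.com/amberneil/datasnap | datasnap/helpers.py | build_size_index
-- ===== SOURCE A (Python) =====
-- def build_size_index(file_map):
--     table = {}
--     for path, data in file_map.items():
--         size = data.get('st_size', 0)
--         if not table.get(size):
--             table[size] = set()
--         table[size].add(path)
--     return table
-- ===== SOURCE B (Python) =====
-- def build_size_index(file_map):
--     # gather-per-key: compute each entry's size once, list the distinct sizes
--     # in first-appearance order, then collect the paths of each size group
--     pairs = [(path, data.get('st_size', 0)) for path, data in file_map.items()]
--     sizes = list(dict.fromkeys(size for _, size in pairs))
--     return {s: {p for p, s2 in pairs if s2 == s} for s in sizes}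
-- ===== Notes on version B (the rewrite author's own statement) =====
-- stated objective: alternative
-- what changed: Replaces A's scatter-into-buckets loop (create-bucket-if-falsy, then add) with a gather: precompute (path, size) pairs, dedupe the sizes in first-appearance order, then build each size's path set by a per-size comprehension over the pairs.
import Mathlib
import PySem

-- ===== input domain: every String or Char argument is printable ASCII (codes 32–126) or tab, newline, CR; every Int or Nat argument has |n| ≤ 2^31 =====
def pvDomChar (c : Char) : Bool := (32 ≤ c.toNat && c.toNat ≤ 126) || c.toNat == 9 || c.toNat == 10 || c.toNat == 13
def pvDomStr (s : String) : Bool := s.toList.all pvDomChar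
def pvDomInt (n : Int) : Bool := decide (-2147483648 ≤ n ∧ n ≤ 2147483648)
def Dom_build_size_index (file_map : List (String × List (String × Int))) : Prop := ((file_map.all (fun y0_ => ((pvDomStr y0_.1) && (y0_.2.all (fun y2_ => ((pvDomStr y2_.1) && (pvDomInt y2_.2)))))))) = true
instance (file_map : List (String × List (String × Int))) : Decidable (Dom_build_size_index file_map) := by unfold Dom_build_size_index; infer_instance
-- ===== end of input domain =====

-- B gathers per size (pairs, deduped sizes, per-size set comprehension) instead of A's scatter loop; alternative decomposition, not faster.


-- ===== PORT A =====
def build_size_index (file_map : List (String × List (String × Int))) : List (Int × List String) :=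
  ((PySem.Dict.ofList file_map).items.foldl
    (fun table pd =>
      let size : Int := (PySem.Dict.ofList pd.2).getD "st_size" 0
      let table :=
        if (table.get? size).getD PySem.Set.empty = (PySem.Set.empty : PySem.Set String) then
          table.insert size PySem.Set.empty
        else table
      table.modify size PySem.Set.empty (fun s => PySem.Set.add s pd.1))
    PySem.Dict.empty).items

-- ===== PORT B =====
def build_size_index_alt (file_map : List (String × List (String × Int))) : List (Int × List String) :=
  let pairs := (PySem.Dict.ofList file_map).items.map
      (fun pd => (pd.1, (PySem.Dict.ofList pd.2).getD "st_size" 0))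
  let sizes := PySem.List.dedup (pairs.map (·.2))
  sizes.map (fun s => (s, PySem.Set.ofList ((pairs.filter (fun q => q.2 == s)).map (·.1))))

-- ===== PRECONDITION & SPEC =====
def Spec_build_size_index (file_map : List (String × List (String × Int))) (out : List (Int × List String)) : Prop := out = build_size_index_alt file_map
instance (file_map : List (String × List (String × Int))) (out : List (Int × List String)) : Decidable (Spec_build_size_index file_map out) := by unfold Spec_build_size_index; infer_instance

-- ===== CLAIM (what is proved, stated in full; the proofs are below) =====
def Claim_equal_build_size_index : Prop := ∀ (file_map : List (String × List (String × Int))), Dom_build_size_index file_map → Spec_build_size_index file_map (build_size_index file_map)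

-- ===== LEMMAS AND PROOFS =====

-- the plain "modify" step: what A's create-then-add amounts to
def pvUpd (t : PySem.Dict Int (PySem.Set String)) (q : String × Int) : PySem.Dict Int (PySem.Set String) :=
  t.modify q.2 PySem.Set.empty (fun v => PySem.Set.add v q.1)

theorem pv_step_eq (t : PySem.Dict Int (PySem.Set String)) (p : String) (s : Int) :
    (if (t.get? s).getD PySem.Set.empty = (PySem.Set.empty : PySem.Set String) then
        t.insert s PySem.Set.empty
      else t).modify s PySem.Set.empty (fun v => PySem.Set.add v p)
    = t.modify s PySem.Set.empty (fun v => PySem.Set.add v p) := by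
  split_ifs with h
  · have h' : (t.get? s).getD [] = [] := h
    simp [PySem.Dict.modify, PySem.Dict.insert_insert_self,
      PySem.Dict.getD_eq_get?_getD, PySem.Set.empty, PySem.Set.add, h']
  · rfl

theorem pv_getD_foldl_upd (l : List (String × Int)) (d : PySem.Dict Int (PySem.Set String)) (s : Int) :
    (l.foldl pvUpd d).getD s PySem.Set.empty
    = l.foldl (fun v q => if q.2 = s then PySem.Set.add v q.1 else v) (d.getD s PySem.Set.empty) := by
  induction l generalizing d with
  | nil => rfl
  | cons q rest ih =>
    simp only [List.foldl_cons, ih, pvUpd, PySem.Dict.getD_modify]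
    by_cases hq : q.2 = s
    · simp [hq]
    · simp [hq, Ne.symm hq]

theorem pv_filter_fold (l : List (String × Int)) (s : Int) (v0 : PySem.Set String) :
    l.foldl (fun v q => if q.2 = s then PySem.Set.add v q.1 else v) v0
    = ((l.filter (fun q => q.2 == s)).map (·.1)).foldl PySem.Set.add v0 := by
  induction l generalizing v0 with
  | nil => rfl
  | cons q rest ih =>
    by_cases hq : q.2 = s
    · simp [hq, ih]
    · simp [hq, ih]

theorem build_size_index_spec : Claim_equal_build_size_index := by
  intro fm _
  unfold Spec_build_size_index build_size_index build_size_index_alt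
  have hstep :
      (fun (table : PySem.Dict Int (PySem.Set String)) (pd : String × List (String × Int)) =>
        let size : Int := (PySem.Dict.ofList pd.2).getD "st_size" 0
        let table :=
          if (table.get? size).getD PySem.Set.empty = (PySem.Set.empty : PySem.Set String) then
            table.insert size PySem.Set.empty
          else table
        table.modify size PySem.Set.empty (fun s => PySem.Set.add s pd.1))
      = (fun table pd => pvUpd table (pd.1, (PySem.Dict.ofList pd.2).getD "st_size" 0)) := by
    funext t pd
    exact pv_step_eq t pd.1 _
  rw [hstep]
  set l := (PySem.Dict.ofList fm).items with hl
  have hmap :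
      l.foldl (fun table pd => pvUpd table (pd.1, (PySem.Dict.ofList pd.2).getD "st_size" 0)) PySem.Dict.empty
      = (l.map (fun pd => (pd.1, (PySem.Dict.ofList pd.2).getD "st_size" 0))).foldl pvUpd PySem.Dict.empty := by
    rw [List.foldl_map]
  rw [hmap]
  set ps := l.map (fun pd => (pd.1, (PySem.Dict.ofList pd.2).getD "st_size" 0)) with hps
  -- the final dict: nodup keys, keys as deduped sizes
  have hnd : (ps.foldl pvUpd PySem.Dict.empty).keys.Nodup := by
    have := PySem.Dict.nodup_keys_foldl_modify_key ps (fun q : String × Int => q.2)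
      PySem.Set.empty (fun _ q => fun v => PySem.Set.add v q.1)
      (PySem.Dict.empty : PySem.Dict Int (PySem.Set String)) PySem.Dict.nodup_keys_empty
    exact this
  have hkeys : (ps.foldl pvUpd PySem.Dict.empty).keys = PySem.List.dedup (ps.map (·.2)) := by
    have := PySem.Dict.keys_foldl_modify_key ps (fun q : String × Int => q.2)
      PySem.Set.empty (fun _ q => fun v => PySem.Set.add v q.1)
      (PySem.Dict.empty : PySem.Dict Int (PySem.Set String))
    simpa [PySem.Dict.keys_empty, PySem.Set.update, PySem.Set.ofList_eq_foldl] using this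
  rw [PySem.Dict.items_eq_map_keys _ hnd PySem.Set.empty, hkeys]
  apply List.map_congr_left
  intro s _
  have := pv_getD_foldl_upd ps PySem.Dict.empty s
  rw [this, PySem.Dict.getD_empty, pv_filter_fold, PySem.Set.ofList_eq_foldl]
  rfl
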